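-- pv_equiv track=rewrite | github.com/dibaggioj/bioinformatics-rosalind | textbook/src/ba1f.py | find_skew
-- ===== SOURCE A (Python) =====
-- def find_skew(genome):
--     """
--     Return list of all skew values across the genome
--     :param genome: DNA string
--     :type genome: str
--     :return: list of skew values across the genome
--     :rtype: list[int]
--     """
--     skew = list([0])  # initialize list with 0 skew at beginning
--     current_skew = 0
--     for c in genome:
--         if c == 'C':
--             current_skew -= 1
--         elif c == 'G':
--             current_skew += 1
--         skew.append(current_skew)
--     return skew
-- ===== SOURCE B (Python) =====
-- def find_skew(genome):
--     """
--     Return list of all skew values across the genome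
--     :param genome: DNA string
--     :return: list of skew values (leading 0, length len(genome)+1)
--     """
--     def solve(s):
--         # divide and conquer: skew list of s = skew list of left half,
--         # followed by the right half's skew list offset by the left's last value
--         if not s:
--             return [0]
--         if len(s) == 1:
--             return [0, 1 if s == 'G' else (-1 if s == 'C' else 0)]
--         mid = len(s) // 2
--         left = solve(s[:mid])
--         right = solve(s[mid:])
--         off = left[-1]
--         return left + [off + v for v in right[1:]]
--     return solve(genome)
-- ===== Notes on version B (the rewrite author's own statement) =====
-- stated objective: alternative
-- what changed: Replaces the single-pass running accumulator with a divide-and-conquer recursion: the skew list of a string is the skew list of its left half followed by the right half's skew list shifted by the left half's final skew.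
import Mathlib
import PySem

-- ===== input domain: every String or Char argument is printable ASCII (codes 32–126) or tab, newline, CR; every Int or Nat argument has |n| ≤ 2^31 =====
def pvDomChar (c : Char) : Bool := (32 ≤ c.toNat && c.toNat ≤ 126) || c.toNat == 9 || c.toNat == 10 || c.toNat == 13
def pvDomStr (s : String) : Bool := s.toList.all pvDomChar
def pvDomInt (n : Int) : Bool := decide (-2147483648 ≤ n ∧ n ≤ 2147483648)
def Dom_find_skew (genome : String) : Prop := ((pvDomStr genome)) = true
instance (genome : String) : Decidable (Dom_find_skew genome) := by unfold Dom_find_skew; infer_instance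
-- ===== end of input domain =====

-- B is an alternative divide-and-conquer decomposition of the same exact function (not claimed faster).

-- ===== PORT A =====
-- A: single loop appending the running skew to an accumulator list (leading 0).
def findSkewLoopA : List Char → Int → List Int → List Int
  | [], _, skew => skew
  | c :: cs, cur, skew =>
      let cur' := if c = 'C' then cur - 1 else if c = 'G' then cur + 1 else cur
      findSkewLoopA cs cur' (skew ++ [cur'])

def find_skew (genome : String) : List Int :=
  findSkewLoopA genome.toList 0 [0]

-- ===== PORT B =====
-- B: divide and conquer: skew of s = skew of left half ++ (right half's skew
-- list, first element dropped, shifted by the left half's last value).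
def skewDelta (c : Char) : Int :=
  if c = 'G' then 1 else if c = 'C' then -1 else 0

-- left[-1]: the left list is always nonempty, so getLastD 0 is exactly left[-1]
def solveSkew : List Char → List Int
  | [] => [0]
  | [c] => [0, skewDelta c]
  | a :: b :: rest =>
      let s := a :: b :: rest
      let mid := s.length / 2
      let left := solveSkew (s.take mid)
      let right := solveSkew (s.drop mid)
      let off := left.getLastD 0
      left ++ right.tail.map (fun v => off + v)
termination_by s => s.length
decreasing_by
  · simp [List.length_take]; omega
  · simp [List.length_drop]; omega

def find_skew_alt (genome : String) : List Int :=
  solveSkew genome.toList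

-- ===== PRECONDITION & SPEC =====
def Spec_find_skew (genome : String) (out : List Int) : Prop := out = find_skew_alt genome
instance (genome : String) (out : List Int) : Decidable (Spec_find_skew genome out) := by unfold Spec_find_skew; infer_instance

-- ===== CLAIM (what is proved, stated in full; the proofs are below) =====
def Claim_equal_find_skew : Prop := ∀ (genome : String), Dom_find_skew genome → Spec_find_skew genome (find_skew genome)

-- ===== LEMMAS AND PROOFS =====
-- Common characterisation: the list of prefix sums of the deltas, starting at s.
def prefixSums : Int → List Int → List Int
  | s, [] => [s]
  | s, d :: ds => s :: prefixSums (s + d) ds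

theorem prefixSums_shift (k s : Int) (ds : List Int) :
    prefixSums (k + s) ds = (prefixSums s ds).map (fun v => k + v) := by
  induction ds generalizing s with
  | nil => simp [prefixSums]
  | cons d ds ih => simp [prefixSums, ← ih, add_assoc]

theorem prefixSums_getLastD (ds : List Int) (s d : Int) :
    (prefixSums s ds).getLastD d = s + ds.sum := by
  induction ds generalizing s d with
  | nil => simp [prefixSums]
  | cons e ds ih =>
      rw [prefixSums, List.getLastD_cons, ih]
      simp [add_assoc]

theorem prefixSums_append (s : Int) (ds₁ ds₂ : List Int) :
    prefixSums s (ds₁ ++ ds₂)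
      = prefixSums s ds₁ ++ (prefixSums (s + ds₁.sum) ds₂).tail := by
  induction ds₁ generalizing s with
  | nil =>
      simp only [List.nil_append, prefixSums, List.sum_nil, add_zero]
      cases ds₂ <;> simp [prefixSums]
  | cons d ds ih =>
      simp [prefixSums, ih, add_assoc]

-- A's loop produces the prefix sums of the deltas.
theorem findSkewLoopA_eq_prefixSums (cs : List Char) (cur : Int) (skew : List Int) :
    findSkewLoopA cs cur (skew ++ [cur]) = skew ++ prefixSums cur (cs.map skewDelta) := by
  induction cs generalizing cur skew with
  | nil => simp [findSkewLoopA, prefixSums]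
  | cons c cs ih =>
      have hd : (if c = 'C' then cur - 1 else if c = 'G' then cur + 1 else cur)
          = cur + skewDelta c := by
        by_cases hC : c = 'C'
        · subst hC; simp [skewDelta]; ring
        · by_cases hG : c = 'G' <;> simp [skewDelta, hC, hG]
      simp only [findSkewLoopA, List.map_cons, prefixSums, hd]
      have := ih (cur + skewDelta c) (skew ++ [cur])
      simpa using this

-- B's divide and conquer produces the same prefix sums.
theorem solveSkew_eq_prefixSums (l : List Char) :
    solveSkew l = prefixSums 0 (l.map skewDelta) := by
  induction l using solveSkew.induct with
  | case1 => simp [solveSkew, prefixSums]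
  | case2 c => rw [solveSkew]; simp [prefixSums]
  | case3 a b rest s mid ihL ihR =>
      rw [solveSkew]
      simp only [mid, s] at ihL ihR
      simp only [ihL, ihR, prefixSums_getLastD]
      have hsplit : (a :: b :: rest).map skewDelta
          = ((a :: b :: rest).take ((a :: b :: rest).length / 2)).map skewDelta
            ++ ((a :: b :: rest).drop ((a :: b :: rest).length / 2)).map skewDelta := by
        rw [← List.map_append, List.take_append_drop]
      rw [hsplit, prefixSums_append]
      congr 1
      rw [show ((0 : Int) + (((a :: b :: rest).take ((a :: b :: rest).length / 2)).map skewDelta).sum)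
            = (0 + (((a :: b :: rest).take ((a :: b :: rest).length / 2)).map skewDelta).sum) + 0 by ring,
          prefixSums_shift]
      simp

-- ===== VERDICT (by name: the statement is the Claim_ definition above) =====
theorem find_skew_spec : Claim_equal_find_skew := by
  intro genome _
  unfold Spec_find_skew find_skew find_skew_alt
  rw [solveSkew_eq_prefixSums]
  simpa using findSkewLoopA_eq_prefixSums genome.toList 0 []
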